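-- pv_equiv track=rewrite | github.com/plotnikov-auca-2021/MAT5164---GRAPHS-AND-NETWORKS | Case Study/problem1_cpp.py | euler_tour_multigraph
-- ===== SOURCE A (Python) =====
-- def euler_tour_multigraph(multiedges, start):
--     G = {u: dict(vs) for u, vs in multiedges.items()}
--     for u in list(G):
--         for v in list(G[u]):
--             if G[u][v] == 0:
--                 del G[u][v]
--     stack = [start]
--     circuit = []
--     while stack:
--         u = stack[-1]
--         if G[u]:
--             v = next(iter(G[u]))
--             G[u][v] -= 1
--             if G[u][v] == 0: del G[u][v]
--             G[v][u] -= 1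
--             if G[v][u] == 0: del G[v][u]
--             stack.append(v)
--         else:
--             circuit.append(stack.pop())
--     circuit.reverse()
--     return circuit
-- ===== SOURCE B (Python) =====
-- def euler_tour_multigraph(multiedges, start):
--     # Recursive Hierholzer: build the pruned adjacency dicts in one fused
--     # comprehension (no separate zero-edge pass), then a post-order dfs
--     # replaces A's explicit stack; edge selection/mutation order is identical.
--     G = {u: {v: c for v, c in dict(vs).items() if c != 0}
--          for u, vs in multiedges.items()}
--     circuit = []
--
--     def dfs(u):
--         while G[u]:
--             v = next(iter(G[u]))
--             G[u][v] -= 1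
--             if G[u][v] == 0:
--                 del G[u][v]
--             G[v][u] -= 1
--             if G[v][u] == 0:
--                 del G[v][u]
--             dfs(v)
--         circuit.append(u)
--
--     dfs(start)
--     circuit.reverse()
--     return circuit
-- ===== Notes on version B (the rewrite author's own statement) =====
-- stated objective: alternative
-- what changed: Replaces the explicit-stack Hierholzer loop by a recursive post-order dfs and fuses A's two construction passes (build dict-of-dicts, then delete zero entries) into one filtered dict comprehension; edge selection and mutation order coincide, so the tour is identical.
import Mathlib
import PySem

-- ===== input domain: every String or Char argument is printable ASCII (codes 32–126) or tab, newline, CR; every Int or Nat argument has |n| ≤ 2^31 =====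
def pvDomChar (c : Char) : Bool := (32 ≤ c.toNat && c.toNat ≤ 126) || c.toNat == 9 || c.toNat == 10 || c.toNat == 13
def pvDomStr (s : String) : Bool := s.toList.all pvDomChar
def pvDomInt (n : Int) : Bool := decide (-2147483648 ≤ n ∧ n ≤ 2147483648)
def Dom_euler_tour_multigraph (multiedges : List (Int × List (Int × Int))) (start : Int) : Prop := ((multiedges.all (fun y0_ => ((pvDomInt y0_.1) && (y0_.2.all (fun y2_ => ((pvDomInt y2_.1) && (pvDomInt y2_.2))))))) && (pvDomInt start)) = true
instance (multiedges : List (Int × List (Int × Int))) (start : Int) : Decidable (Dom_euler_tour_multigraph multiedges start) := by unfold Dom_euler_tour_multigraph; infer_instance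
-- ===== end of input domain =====

-- B replaces A's explicit-stack Hierholzer loop by a recursive post-order dfs, and fuses
-- A's two construction passes (build dict-of-dicts, then delete zero entries) into one
-- filtered build.  Edge selection and mutation order coincide step for step, so the two
-- produce the same tour; the proof re-associates the stack iteration into the recursion.
-- Python dicts are modelled by transparent assoc lists with exact dict semantics
-- (first-match lookup, in-place overwrite, delete); PySem.Dict is not used because the
-- algorithm is built around `del`, for which no PySem.Dict lemmas exist.

-- ===== shared dict helpers (exact Python dict semantics on assoc lists) =====
def alGet {κ ν : Type} [DecidableEq κ] : List (κ × ν) → κ → Option ν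
  | [], _ => none
  | p :: t, x => if p.1 = x then some p.2 else alGet t x

def alGetD {κ ν : Type} [DecidableEq κ] (l : List (κ × ν)) (x : κ) (d : ν) : ν :=
  (alGet l x).getD d

def alSet {κ ν : Type} [DecidableEq κ] : List (κ × ν) → κ → ν → List (κ × ν)
  | [], x, w => [(x, w)]
  | p :: t, x, w => if p.1 = x then (x, w) :: t else p :: alSet t x w

def alDel {κ ν : Type} [DecidableEq κ] (l : List (κ × ν)) (x : κ) : List (κ × ν) :=
  l.filter (fun p => decide (¬ p.1 = x))

def wsum {κ ν : Type} (w : ν → Nat) (l : List (κ × ν)) : Nat :=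
  (l.map (fun p => w p.2)).sum

-- dict(vs): build a dict from a pair list, later pairs overwriting earlier ones
def dictOf (vs : List (Int × Int)) : List (Int × Int) :=
  vs.foldl (fun d p => alSet d p.1 p.2) []

-- ===== PORT A =====
-- for v in list(G[u]): if G[u][v] == 0: del G[u][v]   (loop over a snapshot of the keys)
def pruneD (d : List (Int × Int)) : List (Int × Int) :=
  d.foldl (fun acc p => if alGetD acc p.1 0 = 0 then alDel acc p.1 else acc) d

-- G[a][b] -= 1; if G[a][b] == 0: del G[a][b]
def decA (G : List (Int × List (Int × Int))) (a b : Int) : List (Int × List (Int × Int)) :=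
  alSet G a (if alGetD (alGetD G a []) b 0 - 1 = 0
             then alDel (alGetD G a []) b
             else alSet (alGetD G a []) b (alGetD (alGetD G a []) b 0 - 1))

theorem wsum_le_of_sublist {κ ν : Type} (w : ν → Nat) (l l' : List (κ × ν))
    (h : List.Sublist l' l) : wsum w l' ≤ wsum w l := by
  unfold wsum
  exact List.Sublist.sum_le_sum (List.Sublist.map _ h) (fun _ _ => Nat.zero_le _)

theorem wsum_alSet_lt {κ ν : Type} [DecidableEq κ] (w : ν → Nat) (l : List (κ × ν)) (k : κ)
    (x y : ν) (h : alGet l k = some x) (hw : w y < w x) : wsum w (alSet l k y) < wsum w l := by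
  induction l with
  | nil => simp [alGet] at h
  | cons p t ih =>
    by_cases hp : p.1 = k
    · simp only [alGet, if_pos hp, Option.some.injEq] at h
      simp only [alSet, if_pos hp, wsum, List.map_cons, List.sum_cons]
      have : w y < w p.2 := h ▸ hw
      omega
    · simp only [alGet, if_neg hp] at h
      have h2 : wsum w (alSet t k y) < wsum w t := ih h
      simp only [alSet, if_neg hp, wsum, List.map_cons, List.sum_cons]
      unfold wsum at h2
      omega

theorem wsum_alDel_lt {κ ν : Type} [DecidableEq κ] (w : ν → Nat) (l : List (κ × ν)) (k : κ)
    (x : ν) (h : alGet l k = some x) (hw : 0 < w x) : wsum w (alDel l k) < wsum w l := by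
  induction l with
  | nil => simp [alGet] at h
  | cons p t ih =>
    by_cases hp : p.1 = k
    · simp only [alGet, if_pos hp, Option.some.injEq] at h
      have hle : wsum w (alDel t k) ≤ wsum w t :=
        wsum_le_of_sublist w t _ List.filter_sublist
      have hdrop : alDel (p :: t) k = alDel t k := by
        simp [alDel, hp]
      rw [hdrop]
      have : 0 < w p.2 := h ▸ hw
      simp only [wsum, List.map_cons, List.sum_cons] at *
      omega
    · simp only [alGet, if_neg hp] at h
      have h2 : wsum w (alDel t k) < wsum w t := ih h
      have hkeep : alDel (p :: t) k = p :: alDel t k := by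
        simp [alDel, hp]
      rw [hkeep]
      simp only [wsum, List.map_cons, List.sum_cons] at *
      omega

theorem alGet_eq_some_of_getD_ne {κ ν : Type} [DecidableEq κ] (l : List (κ × ν)) (k : κ)
    (d : ν) (h : ¬ alGetD l k d = d) : alGet l k = some (alGetD l k d) := by
  unfold alGetD at *
  cases h' : alGet l k with
  | none => rw [h'] at h; simp at h
  | some v => simp

def mI : List (Int × Int) → Nat := wsum Int.toNat
def mG : List (Int × List (Int × Int)) → Nat := wsum mI

theorem mG_decA_lt (G : List (Int × List (Int × Int))) (a b : Int)
    (h : 0 < alGetD (alGetD G a []) b 0) : mG (decA G a b) < mG G := by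
  have hsome : alGet (alGetD G a []) b = some (alGetD (alGetD G a []) b 0) :=
    alGet_eq_some_of_getD_ne _ _ _ (by omega)
  have hG : alGet G a = some (alGetD G a []) := by
    cases hg : alGet G a with
    | none =>
      exfalso
      unfold alGetD at hsome
      rw [hg] at hsome
      simp [alGet] at hsome
    | some inner => unfold alGetD; rw [hg]; simp
  unfold decA mG
  by_cases h0 : alGetD (alGetD G a []) b 0 - 1 = 0
  · rw [if_pos h0]
    exact wsum_alSet_lt mI G a _ _ hG (wsum_alDel_lt Int.toNat _ b _ hsome (by omega))
  · rw [if_neg h0]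
    exact wsum_alSet_lt mI G a _ _ hG (wsum_alSet_lt Int.toNat _ b _ _ hsome (by omega))

-- the while loop of A (stack top = list head; bail branches are totality guards for
-- inputs on which the Python loops forever or raises — all outside Pre_)
def loopA (G : List (Int × List (Int × Int))) (stack circuit : List Int) : List Int :=
  match stack with
  | [] => circuit
  | u :: rest =>
    match _h : alGetD G u [] with
    | [] => loopA G rest (circuit ++ [u])
    | (v, c1) :: _ =>
      if _h1 : c1 ≤ 0 then circuit
      else if _h2 : alGetD (alGetD (decA G u v) v []) u 0 ≤ 0 then circuit
      else loopA (decA (decA G u v) v u) (v :: u :: rest) circuit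
termination_by mG G + stack.length
decreasing_by
  · simp only [List.length_cons]; omega
  · have h1 : 0 < alGetD (alGetD G u []) v 0 := by
      rw [_h]; simp [alGetD, alGet]; omega
    have d1 := mG_decA_lt G u v h1
    have d2 := mG_decA_lt (decA G u v) v u (by omega)
    simp only [List.length_cons]; omega

def euler_tour_multigraph (multiedges : List (Int × List (Int × Int))) (start : Int) : List Int :=
  (loopA ((multiedges.foldl (fun acc p => alSet acc p.1 (dictOf p.2)) []).map
            (fun q => (q.1, pruneD q.2)))
        [start] []).reverse

-- ===== PORT B =====
-- G = {u: {v: c for v, c in dict(vs).items() if c != 0} for u, vs in multiedges.items()}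
def buildGB (me : List (Int × List (Int × Int))) : List (Int × List (Int × Int)) :=
  me.foldl (fun acc p => alSet acc p.1 ((dictOf p.2).filter (fun q => decide (¬ q.2 = 0)))) []

-- def dfs(u): while G[u]: v = next(iter(G[u])); decrement/delete both directions; dfs(v)
--             circuit.append(u)
-- The port threads (G, circuit); the Nat argument is fuel for totality only (set large
-- enough at the call site), and the Bool marks a bail where the Python dfs would raise
-- (same guards, in the same order, as loopA's bail branches — all outside Pre_).
def dfsB : Nat → List (Int × List (Int × Int)) → Int → List Int →
    List (Int × List (Int × Int)) × List Int × Bool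
  | 0, G, _, c => (G, c, true)
  | n + 1, G, u, c =>
    match alGetD G u [] with
    | [] => (G, c ++ [u], false)
    | (v, c1) :: _ =>
      if c1 ≤ 0 then (G, c, true)
      else if alGetD (alGetD (decA G u v) v []) u 0 ≤ 0 then (G, c, true)
      else
        match dfsB n (decA (decA G u v) v u) v c with
        | (G1, c1', true) => (G1, c1', true)
        | (G1, c1', false) => dfsB n G1 u c1'

def euler_tour_multigraph_alt (multiedges : List (Int × List (Int × Int))) (start : Int) : List Int :=
  ((dfsB (mG (buildGB multiedges) + 1) (buildGB multiedges) start []).2.1).reverse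

-- ===== PRECONDITION & SPEC =====
-- inner dict of u in the collapsed outer dict (duplicate outer keys: last wins, as Python's
-- dict construction; duplicate inner keys: last wins, as dict(vs))
def rowOf (me : List (Int × List (Int × Int))) (u : Int) : List (Int × Int) :=
  dictOf (((me.reverse.find? (fun p => p.1 = u)).getD (u, [])).2)

def cntOf (me : List (Int × List (Int × Int))) (u v : Int) : Int := alGetD (rowOf me u) v 0

def adjOf (me : List (Int × List (Int × Int))) (u : Int) : List Int :=
  ((rowOf me u).filter (fun q => decide (¬ q.2 = 0))).map (·.1)

-- Pre_ below is a static condition on the INPUT graph (counts, symmetry, membership),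
-- not a run of either port: rowOf/cntOf/adjOf are plain dictionary lookups into the input,
-- and reachStep/reachN compute the set of vertices connected to start by nonzero edges
-- (one neighbourhood-expansion step, iterated |multiedges| times, which saturates).
-- vertices reachable from S along edges of nonzero multiplicity (one expansion step)
def reachStep (me : List (Int × List (Int × Int))) (S : List Int) : List Int :=
  (S ++ S.flatMap (adjOf me)).dedup

def reachN (me : List (Int × List (Int × Int))) : Nat → List Int → List Int
  | 0, S => S
  | n + 1, S => reachN me n (reachStep me S)

-- Pre_ = exactly the inputs on which the Python A returns normally: start is a key, and on
-- the component reachable from start every listed edge has positive multiplicity, is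
-- symmetric, and self-loops have even multiplicity.  Outside this A raises KeyError or
-- loops forever; ill-formed data beyond start's component is allowed (A never touches it).
def Pre_euler_tour_multigraph (multiedges : List (Int × List (Int × Int))) (start : Int) : Prop :=
  start ∈ multiedges.map (·.1) ∧
  ∀ u ∈ reachN multiedges multiedges.length [start], ∀ v ∈ adjOf multiedges u,
    0 < cntOf multiedges u v ∧ cntOf multiedges u v = cntOf multiedges v u ∧
    (u = v → cntOf multiedges u u % 2 = 0)

instance (multiedges : List (Int × List (Int × Int))) (start : Int) :
    Decidable (Pre_euler_tour_multigraph multiedges start) := by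
  unfold Pre_euler_tour_multigraph; infer_instance

def pvWitness_euler_tour_multigraph : (List (Int × List (Int × Int))) × Int :=
  ([(0, [(1, 2)]), (1, [(0, 2)])], 0)

def Spec_euler_tour_multigraph (multiedges : List (Int × List (Int × Int))) (start : Int) (out : List Int) : Prop := out = euler_tour_multigraph_alt multiedges start
instance (multiedges : List (Int × List (Int × Int))) (start : Int) (out : List Int) : Decidable (Spec_euler_tour_multigraph multiedges start out) := by unfold Spec_euler_tour_multigraph; infer_instance

-- ===== CLAIM (what is proved, stated in full; the proofs are below) =====
def Claim_equal_euler_tour_multigraph : Prop := ∀ (multiedges : List (Int × List (Int × Int))) (start : Int), Dom_euler_tour_multigraph multiedges start → Pre_euler_tour_multigraph multiedges start → Spec_euler_tour_multigraph multiedges start (euler_tour_multigraph multiedges start)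

-- ===== LEMMAS AND PROOFS =====
-- (the equivalence in fact holds for every input: both ports bail at the same state with
-- the same accumulated circuit; Pre_ is needed only so that the PYTHON programs return)

def alKeys {κ ν : Type} (l : List (κ × ν)) : List κ := l.map (·.1)

theorem alGet_alDel_ne {κ ν : Type} [DecidableEq κ] (l : List (κ × ν)) (k k' : κ)
    (h : k' ≠ k) : alGet (alDel l k) k' = alGet l k' := by
  induction l with
  | nil => simp [alDel]
  | cons p t ih =>
    by_cases hp : p.1 = k
    · have hk : ¬ p.1 = k' := by rw [hp]; exact fun hh => h hh.symm
      have hd : alDel (p :: t) k = alDel t k := by simp [alDel, hp]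
      rw [hd, ih, alGet, if_neg hk]
    · have hd : alDel (p :: t) k = p :: alDel t k := by simp [alDel, hp]
      rw [hd]
      simp only [alGet, ih]

theorem alGet_isSome_iff_mem {κ ν : Type} [DecidableEq κ] (l : List (κ × ν)) (k : κ) :
    (alGet l k).isSome = true ↔ k ∈ alKeys l := by
  induction l with
  | nil => simp [alGet, alKeys]
  | cons p t ih =>
    by_cases hp : p.1 = k
    · simp [alGet, hp, alKeys]
    · have hne : ¬ k = p.1 := fun hh => hp hh.symm
      simp [alGet, hp, alKeys, ih, hne]

theorem alGet_eq_none_of_not_mem {κ ν : Type} [DecidableEq κ] (l : List (κ × ν)) (k : κ)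
    (h : k ∉ alKeys l) : alGet l k = none := by
  cases hg : alGet l k with
  | none => rfl
  | some v => exact absurd ((alGet_isSome_iff_mem l k).mp (by simp [hg])) h

theorem alGet_of_mem_nodup {κ ν : Type} [DecidableEq κ] (l : List (κ × ν)) (p : κ × ν)
    (hn : (alKeys l).Nodup) (h : p ∈ l) : alGet l p.1 = some p.2 := by
  induction l with
  | nil => simp at h
  | cons q t ih =>
    have hcons : q.1 ∉ alKeys t ∧ (alKeys t).Nodup := List.nodup_cons.mp hn
    rcases List.mem_cons.mp h with h1 | h1
    · simp [alGet, h1]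
    · have hmemk : p.1 ∈ alKeys t := List.mem_map_of_mem h1
      have hne : ¬ q.1 = p.1 := fun hh => hcons.1 (hh ▸ hmemk)
      simp only [alGet, if_neg hne]
      exact ih hcons.2 h1

theorem alKeys_alSet_mem {κ ν : Type} [DecidableEq κ] (l : List (κ × ν)) (k : κ) (v : ν)
    (h : k ∈ alKeys l) : alKeys (alSet l k v) = alKeys l := by
  induction l with
  | nil => simp [alKeys] at h
  | cons p t ih =>
    by_cases hp : p.1 = k
    · simp [alSet, hp, alKeys]
    · have hmem : k ∈ alKeys t := by
        rcases (by simpa [alKeys] using h : k = p.1 ∨ k ∈ alKeys t) with h1 | h1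
        · exact absurd h1.symm hp
        · exact h1
      have ht := ih hmem
      simp only [alSet, if_neg hp, alKeys, List.map_cons]
      simp only [alKeys] at ht
      rw [ht]

theorem alKeys_alSet_not_mem {κ ν : Type} [DecidableEq κ] (l : List (κ × ν)) (k : κ) (v : ν)
    (h : k ∉ alKeys l) : alKeys (alSet l k v) = alKeys l ++ [k] := by
  induction l with
  | nil => simp [alSet, alKeys]
  | cons p t ih =>
    have hp : ¬ p.1 = k := by
      intro hh
      exact h (by simp [alKeys, hh])
    have ht : k ∉ alKeys t := fun hh => h (by simp [alKeys] at hh ⊢; exact Or.inr hh)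
    simp only [alSet, if_neg hp, alKeys, List.map_cons, List.cons_append]
    have := ih ht
    simp only [alKeys] at this
    rw [this]

theorem nodup_alKeys_alSet {κ ν : Type} [DecidableEq κ] (l : List (κ × ν)) (k : κ) (v : ν)
    (h : (alKeys l).Nodup) : (alKeys (alSet l k v)).Nodup := by
  by_cases hk : k ∈ alKeys l
  · rw [alKeys_alSet_mem _ _ _ hk]; exact h
  · rw [alKeys_alSet_not_mem _ _ _ hk]
    exact h.append (List.nodup_singleton _) (fun a ha hb => by
      simp only [List.mem_singleton] at hb
      exact hk (hb ▸ ha))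

theorem nodup_foldSet (vs : List (Int × Int)) :
    ∀ acc : List (Int × Int), (alKeys acc).Nodup →
      (alKeys (vs.foldl (fun d p => alSet d p.1 p.2) acc)).Nodup := by
  induction vs with
  | nil => intro acc h; exact h
  | cons q t ih =>
    intro acc h
    exact ih _ (nodup_alKeys_alSet _ _ _ h)

theorem dictOf_keys_nodup (vs : List (Int × Int)) : (alKeys (dictOf vs)).Nodup :=
  nodup_foldSet vs [] (by simp [alKeys])

theorem foldPrune_char (l : List (Int × Int)) :
    ∀ acc : List (Int × Int), (alKeys l).Nodup → (∀ p ∈ l, alGet acc p.1 = some p.2) →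
      l.foldl (fun acc p => if alGetD acc p.1 0 = 0 then alDel acc p.1 else acc) acc
        = acc.filter (fun q => decide (¬ alGet l q.1 = some (0 : Int))) := by
  induction l with
  | nil =>
    intro acc _ _
    simp [List.foldl_nil, alGet]
  | cons p t ih =>
    intro acc hn hmem
    have hcons : p.1 ∉ alKeys t ∧ (alKeys t).Nodup := List.nodup_cons.mp hn
    have hpacc : alGetD acc p.1 0 = p.2 := by
      simp [alGetD, hmem p (List.mem_cons_self)]
    rw [List.foldl_cons]
    by_cases hz : p.2 = 0
    · rw [if_pos (by rw [hpacc]; exact hz)]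
      have hmem' : ∀ q ∈ t, alGet (alDel acc p.1) q.1 = some q.2 := by
        intro q hq
        have hne : q.1 ≠ p.1 := by
          intro hh
          exact hcons.1 (hh ▸ List.mem_map_of_mem hq)
        rw [alGet_alDel_ne _ _ _ hne]
        exact hmem q (List.mem_cons_of_mem _ hq)
      rw [ih _ hcons.2 hmem']
      rw [alDel, List.filter_filter]
      apply List.filter_congr
      intro q _
      by_cases hq : q.1 = p.1
      · simp [alGet, hq, hz]
      · have hq' : ¬ p.1 = q.1 := fun hh => hq hh.symm
        simp [alGet, hq, hq']
    · rw [if_neg (by rw [hpacc]; exact hz)]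
      have hmem' : ∀ q ∈ t, alGet acc q.1 = some q.2 := fun q hq =>
        hmem q (List.mem_cons_of_mem _ hq)
      rw [ih _ hcons.2 hmem']
      apply List.filter_congr
      intro q _
      by_cases hq : q.1 = p.1
      · have hgt : alGet t p.1 = none :=
          alGet_eq_none_of_not_mem _ _ hcons.1
        simp [alGet, hq, hgt, hz]
      · have hq' : ¬ p.1 = q.1 := fun hh => hq hh.symm
        simp [alGet, hq']

theorem pruneD_eq_filter (d : List (Int × Int)) (hn : (alKeys d).Nodup) :
    pruneD d = d.filter (fun q => decide (¬ q.2 = 0)) := by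
  unfold pruneD
  rw [foldPrune_char d d hn (fun p hp => alGet_of_mem_nodup d p hn hp)]
  apply List.filter_congr
  intro q hq
  rw [alGet_of_mem_nodup d q hn hq]
  simp

-- mapping pruneD over the values commutes with dict insertion
theorem map_prune_alSet (l : List (Int × List (Int × Int))) (k : Int) (v : List (Int × Int)) :
    (alSet l k v).map (fun q => (q.1, pruneD q.2))
      = alSet (l.map (fun q => (q.1, pruneD q.2))) k (pruneD v) := by
  induction l with
  | nil => simp [alSet]
  | cons p t ih =>
    by_cases hp : p.1 = k
    · simp [alSet, hp]
    · simp [alSet, hp, ih]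

theorem built_commute (me : List (Int × List (Int × Int))) :
    ∀ acc : List (Int × List (Int × Int)),
      (me.foldl (fun acc p => alSet acc p.1 (dictOf p.2)) acc).map (fun q => (q.1, pruneD q.2))
        = me.foldl (fun acc p => alSet acc p.1 (pruneD (dictOf p.2)))
            (acc.map (fun q => (q.1, pruneD q.2))) := by
  induction me with
  | nil => intro acc; rfl
  | cons p t ih =>
    intro acc
    rw [List.foldl_cons, List.foldl_cons, ih, map_prune_alSet]

-- A's built-and-pruned G is literally B's fused build
theorem builtA_eq_builtB (me : List (Int × List (Int × Int))) :
    (me.foldl (fun acc p => alSet acc p.1 (dictOf p.2)) []).map (fun q => (q.1, pruneD q.2))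
      = buildGB me := by
  rw [built_commute me []]
  unfold buildGB
  have hfun : (fun (acc : List (Int × List (Int × Int))) (p : Int × List (Int × Int)) =>
      alSet acc p.1 (pruneD (dictOf p.2)))
      = (fun acc p => alSet acc p.1 ((dictOf p.2).filter (fun q => decide (¬ q.2 = 0)))) := by
    funext acc p
    rw [pruneD_eq_filter _ (dictOf_keys_nodup _)]
  rw [hfun]
  rfl

-- dfs never adds edges
theorem dfsB_mono : ∀ (n : Nat) (G : List (Int × List (Int × Int))) (u : Int) (c : List Int),
    mG (dfsB n G u c).1 ≤ mG G := by
  intro n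
  induction n with
  | zero => intro G u c; simp [dfsB]
  | succ n ih =>
    intro G u c
    show mG (dfsB (n + 1) G u c).1 ≤ mG G
    rw [dfsB]
    cases hGu : alGetD G u [] with
    | nil => simp
    | cons p t =>
      obtain ⟨v, c1⟩ := p
      by_cases h1 : c1 ≤ 0
      · simp [h1]
      · by_cases h2 : alGetD (alGetD (decA G u v) v []) u 0 ≤ 0
        · simp [h1, h2]
        · simp only [if_neg h1, if_neg h2]
          have hc1 : alGetD (alGetD G u []) v 0 = c1 := by
            rw [hGu]; simp [alGetD, alGet]
          have d1 : mG (decA G u v) < mG G := mG_decA_lt G u v (by rw [hc1]; omega)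
          have d2 : mG (decA (decA G u v) v u) < mG (decA G u v) :=
            mG_decA_lt _ v u (by omega)
          cases hrec : dfsB n (decA (decA G u v) v u) v c with
          | mk G1 r =>
            obtain ⟨c1', s1⟩ := r
            have hm1 : mG G1 ≤ mG (decA (decA G u v) v u) := by
              have := ih (decA (decA G u v) v u) v c
              rw [hrec] at this
              exact this
            cases s1 with
            | true => simp; omega
            | false =>
              simp only
              have := ih G1 u c1'
              omega

theorem loopA_nil (G : List (Int × List (Int × Int))) (circuit : List Int) :
    loopA G [] circuit = circuit := by
  rw [loopA.eq_def]

theorem loopA_nil_inner (G : List (Int × List (Int × Int))) (u : Int) (rest circuit : List Int)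
    (h : alGetD G u [] = []) :
    loopA G (u :: rest) circuit = loopA G rest (circuit ++ [u]) := by
  rw [loopA.eq_def]
  split
  · next heq => simp at heq
  · next u' rest' heq =>
    injection heq with h1 h2
    subst h1; subst h2
    split
    · rfl
    · next v c1 tail heq2 =>
      rw [h] at heq2
      simp at heq2

theorem loopA_cons (G : List (Int × List (Int × Int))) (u : Int) (rest circuit : List Int)
    (v c1 : Int) (tail : List (Int × Int)) (h : alGetD G u [] = (v, c1) :: tail) :
    loopA G (u :: rest) circuit =
      (if c1 ≤ 0 then circuit
       else if alGetD (alGetD (decA G u v) v []) u 0 ≤ 0 then circuit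
       else loopA (decA (decA G u v) v u) (v :: u :: rest) circuit) := by
  rw [loopA.eq_def]
  split
  · next heq => simp at heq
  · next u' rest' heq =>
    injection heq with h1 h2
    subst h1; subst h2
    split
    · next heq2 =>
      rw [h] at heq2
      simp at heq2
    · next v' c1' tail' heq2 =>
      rw [h] at heq2
      obtain ⟨⟨h1, h2⟩, _h3⟩ : (v = v' ∧ c1 = c1') ∧ tail = tail' := by
        simpa using heq2
      subst h1; subst h2
      simp only [dite_eq_ite]

-- the re-association: one stack frame of loopA is one dfs call; on a bail (Bool = true)
-- both return the circuit accumulated so far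
theorem simKey : ∀ (n : Nat) (G : List (Int × List (Int × Int))) (u : Int)
    (rest circuit : List Int) (fuel : Nat), mG G + rest.length < n → mG G < fuel →
    loopA G (u :: rest) circuit =
      (match dfsB fuel G u circuit with
       | (_, c', true) => c'
       | (G', c', false) => loopA G' rest c') := by
  intro n
  induction n using Nat.strong_induction_on with
  | _ n ihn =>
    intro G u rest circuit fuel hm hf
    obtain ⟨f, rfl⟩ : ∃ f, fuel = f + 1 := ⟨fuel - 1, by omega⟩
    cases hGu : alGetD G u [] with
    | nil =>
      rw [loopA_nil_inner G u rest circuit hGu, dfsB, hGu]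
    | cons p t =>
      obtain ⟨v, c1⟩ := p
      rw [loopA_cons G u rest circuit v c1 t hGu, dfsB, hGu]
      by_cases h1 : c1 ≤ 0
      · simp [h1]
      · by_cases h2 : alGetD (alGetD (decA G u v) v []) u 0 ≤ 0
        · simp [h1, h2]
        · simp only [if_neg h1, if_neg h2]
          have hc1 : alGetD (alGetD G u []) v 0 = c1 := by
            rw [hGu]; simp [alGetD, alGet]
          have d1 : mG (decA G u v) < mG G := mG_decA_lt G u v (by rw [hc1]; omega)
          have d2 : mG (decA (decA G u v) v u) < mG (decA G u v) :=
            mG_decA_lt _ v u (by omega)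
          have hih1 := ihn (mG (decA (decA G u v) v u) + rest.length + 2)
            (by omega) (decA (decA G u v) v u) v (u :: rest) circuit f
            (by simp only [List.length_cons]; omega) (by omega)
          rw [hih1]
          cases hrec : dfsB f (decA (decA G u v) v u) v circuit with
          | mk G1 r =>
            obtain ⟨c1', s1⟩ := r
            have hm1 : mG G1 ≤ mG (decA (decA G u v) v u) := by
              have := dfsB_mono f (decA (decA G u v) v u) v circuit
              rw [hrec] at this
              exact this
            cases s1 with
            | true => simp
            | false =>
              simp only
              exact ihn (mG G1 + rest.length + 1) (by omega) G1 u rest c1' f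
                (by omega) (by omega)

-- ===== VERDICT (by name: the statement is the Claim_ definition above) =====
theorem euler_tour_multigraph_spec : Claim_equal_euler_tour_multigraph := by
  intro me start _hdom _hpre
  unfold Spec_euler_tour_multigraph euler_tour_multigraph euler_tour_multigraph_alt
  rw [builtA_eq_builtB me]
  have hkey := simKey (mG (buildGB me) + 1) (buildGB me) start [] []
    (mG (buildGB me) + 1) (by simp) (by omega)
  rw [hkey]
  cases hrec : dfsB (mG (buildGB me) + 1) (buildGB me) start [] with
  | mk G' r =>
    obtain ⟨c', s⟩ := r
    cases s with
    | true => rfl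
    | false => simp [loopA_nil]
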